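-- pv_equiv track=rewrite | github.com/HeoYou/algorithm-python | 2022-02-devmatching-1.py | solution
-- ===== SOURCE A (Python) =====
-- def solution(grade):
--     answer = 0
--
--     for i in range(len(grade) - 2, -1, -1):
--         if grade[i] <= grade[i + 1]:
--             continue
--         answer -= grade[i + 1] - grade[i]
--         grade[i] = grade[i + 1]
--
--     return answer
-- ===== SOURCE B (Python) =====
-- def solution(grade):
--     # Forward single pass with a monotonic stack of (value, count) pairs:
--     # each incoming value x pops every stack entry larger than it, charging
--     # (v - x) per popped element; the stack finally encodes the smoothed
--     # (non-decreasing) grade array, which is written back in place.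
--     stack = []
--     answer = 0
--     for x in grade:
--         c = 1
--         while stack and x < stack[-1][0]:
--             v, k = stack.pop()
--             answer += (v - x) * k
--             c += k
--         stack.append((x, c))
--     grade[:] = [v for v, k in stack for _ in range(k)]
--     return answer
-- ===== Notes on version B (the rewrite author's own statement) =====
-- stated objective: alternative
-- what changed: A smooths the list with a backward in-place fix-up loop that decrements the answer per index; B makes a single forward pass with a monotonic stack of (value, count) pairs, charging (v - x) * count for every popped run, and rebuilds the mutated list from the stack.
import Mathlib
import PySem

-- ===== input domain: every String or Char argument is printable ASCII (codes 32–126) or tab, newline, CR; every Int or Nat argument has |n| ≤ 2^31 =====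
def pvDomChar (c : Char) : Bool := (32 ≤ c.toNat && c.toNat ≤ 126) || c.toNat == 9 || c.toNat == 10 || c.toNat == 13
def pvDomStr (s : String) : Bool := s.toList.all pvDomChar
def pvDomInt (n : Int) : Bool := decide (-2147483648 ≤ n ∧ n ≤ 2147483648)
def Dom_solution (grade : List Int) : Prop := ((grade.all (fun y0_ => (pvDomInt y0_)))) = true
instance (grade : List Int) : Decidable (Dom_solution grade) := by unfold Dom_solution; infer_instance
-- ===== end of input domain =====

-- B replaces A's backward in-place fix-up loop (per-index decrements) by a single forward
-- pass with a monotonic stack of (value, count) runs (alternative algorithm; same in-place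
-- mutation of grade). Equivalence is about the return value.


-- ===== PORT A =====
-- A: for i in range(len(grade)-2, -1, -1): if grade[i] <= grade[i+1]: continue;
--    answer -= grade[i+1] - grade[i]; grade[i] = grade[i+1]
def solution (grade : List Int) : Int :=
  let st :=
    (PySem.List.pyRange ((grade.length : Int) - 2) (-1) (-1)).foldl
      (fun (s : List Int × Int) i =>
        let gi := PySem.List.pyGetD s.1 i 0
        let gi1 := PySem.List.pyGetD s.1 (i + 1) 0
        if gi ≤ gi1 then s
        else (PySem.List.pySetD s.1 i gi1, s.2 - (gi1 - gi)))
      (grade, 0)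
  st.2

-- ===== PORT B =====
-- B: forward pass; the while-pop of the Python is the recursion bpop (stack top at head);
-- the final grade[:] = … rebuild only mutates the argument, so it does not appear in the
-- returned value ported here.
def bpop (x : Int) : List (Int × Int) → Int → Int → List (Int × Int) × Int
  | [], ans, c => ([(x, c)], ans)
  | (v, k) :: rest, ans, c =>
    if x < v then bpop x rest (ans + (v - x) * k) (c + k)
    else ((x, c) :: (v, k) :: rest, ans)

def solution_alt (grade : List Int) : Int :=
  (grade.foldl (fun (s : List (Int × Int) × Int) x => bpop x s.1 s.2 1) ([], 0)).2

-- ===== PRECONDITION & SPEC =====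
def Spec_solution (grade : List Int) (out : Int) : Prop := out = solution_alt grade
instance (grade : List Int) (out : Int) : Decidable (Spec_solution grade out) := by unfold Spec_solution; infer_instance

-- ===== CLAIM (what is proved, stated in full; the proofs are below) =====
def Claim_equal_solution : Prop := ∀ (grade : List Int), Dom_solution grade → Spec_solution grade (solution grade)

-- ===== LEMMAS AND PROOFS =====

-- suffix-minimum array (the mathematical description both programs realise)
def sfm : List Int → List Int
  | [] => []
  | a :: rest =>
    match sfm rest with
    | [] => [a]
    | b :: t => min a b :: b :: t

def stepA (s : List Int × Int) (i : Int) : List Int × Int :=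
  let gi := PySem.List.pyGetD s.1 i 0
  let gi1 := PySem.List.pyGetD s.1 (i + 1) 0
  if gi ≤ gi1 then s
  else (PySem.List.pySetD s.1 i gi1, s.2 - (gi1 - gi))

def stepB (s : List (Int × Int) × Int) (x : Int) : List (Int × Int) × Int :=
  bpop x s.1 s.2 1

def expand (st : List (Int × Int)) : List Int :=
  st.flatMap (fun p => List.replicate p.2.toNat p.1)

lemma sfm_ne_nil (a : Int) (rest : List Int) : sfm (a :: rest) ≠ [] := by
  unfold sfm; cases sfm rest <;> simp

lemma sfm_cons (a : Int) (rest : List Int) (b : Int) (t : List Int)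
    (h : sfm rest = b :: t) : sfm (a :: rest) = min a b :: b :: t := by
  unfold sfm; rw [h]

lemma sfm_sorted (p : List Int) : (sfm p).Pairwise (· ≤ ·) := by
  induction p with
  | nil => simp [sfm]
  | cons a rest ih =>
    cases h : sfm rest with
    | nil => unfold sfm; rw [h]; simp
    | cons b t =>
      rw [sfm_cons a rest b t h]
      rw [h] at ih
      rcases ih with _ | ⟨hb, ht⟩
      exact List.Pairwise.cons
        (by
          intro c hc
          rcases List.mem_cons.mp hc with rfl | hc
          · exact min_le_right a c
          · exact (min_le_right a b).trans (hb c hc))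
        (List.Pairwise.cons hb ht)

lemma sfm_append (p : List Int) (x : Int) :
    sfm (p ++ [x]) = (sfm p).map (fun a => min a x) ++ [x] := by
  induction p with
  | nil => simp [sfm]
  | cons a rest ih =>
    cases hr : sfm rest with
    | nil =>
      cases rest with
      | nil => simp [sfm]
      | cons c r => exact absurd hr (sfm_ne_nil c r)
    | cons b t =>
      rw [hr] at ih
      have h1 : sfm (rest ++ [x]) = min b x :: (t.map (fun a => min a x) ++ [x]) := by
        rw [ih]; simp
      rw [List.cons_append, sfm_cons a (rest ++ [x]) _ _ h1,
        sfm_cons a rest b t hr]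
      simp [min_assoc]

lemma bpop_spec (x : Int) (st : List (Int × Int)) (ans c : Int)
    (hpos : ∀ p ∈ st, 1 ≤ p.2) (hc : 1 ≤ c)
    (hsort : (expand st).Pairwise (fun a b => b ≤ a)) :
    expand (bpop x st ans c).1
        = List.replicate c.toNat x ++ (expand st).map (fun a => min a x)
    ∧ (bpop x st ans c).2
        = ans + (expand st).sum - ((expand st).map (fun a => min a x)).sum
    ∧ (∀ p ∈ (bpop x st ans c).1, 1 ≤ p.2) := by
  induction st generalizing ans c with
  | nil =>
    refine ⟨by simp [bpop, expand], by simp [bpop, expand], ?_⟩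
    intro p hp
    simp only [bpop, List.mem_singleton] at hp
    subst hp; exact hc
  | cons hd rest ih =>
    obtain ⟨v, k⟩ := hd
    have hk : 1 ≤ k := hpos (v, k) (List.mem_cons_self)
    have hexp : expand ((v, k) :: rest) = List.replicate k.toNat v ++ expand rest := by
      simp [expand]
    rw [hexp] at hsort
    have hsrest : (expand rest).Pairwise (fun a b => b ≤ a) :=
      hsort.sublist (List.sublist_append_right _ _)
    by_cases hx : x < v
    · have hrec := ih (ans + (v - x) * k) (c + k)
        (fun p hp => hpos p (List.mem_cons_of_mem _ hp)) (by omega) hsrest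
      have hb : bpop x ((v, k) :: rest) ans c = bpop x rest (ans + (v - x) * k) (c + k) := by
        simp [bpop, hx]
      have hmin : min v x = x := min_eq_right hx.le
      have hck : (c + k).toNat = c.toNat + k.toNat := by omega
      have hkc : ((k.toNat : Int)) = k := by omega
      refine ⟨?_, ?_, ?_⟩
      · rw [hb, hrec.1, hexp, List.map_append, List.map_replicate, hmin, hck,
          List.replicate_add, List.append_assoc]

      · rw [hb, hrec.2.1, hexp]
        simp only [List.map_append, List.map_replicate, hmin, List.sum_append,
          List.sum_replicate, nsmul_eq_mul, hkc]
        ring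
      · rw [hb]; exact hrec.2.2
    · have hvx : v ≤ x := not_lt.mp hx
      have hb : bpop x ((v, k) :: rest) ans c = ((x, c) :: (v, k) :: rest, ans) := by
        simp [bpop, hx]
      have hrest_le : ∀ a ∈ expand rest, a ≤ v := by
        intro a ha
        have hv : v ∈ List.replicate k.toNat v := by
          simp; omega
        exact ((List.pairwise_append.mp hsort).2.2 v hv a ha)
      have hid : (expand rest).map (fun a => min a x) = expand rest := by
        rw [List.map_congr_left (fun a ha => min_eq_left ((hrest_le a ha).trans hvx)),
          List.map_id_fun', id_eq]
      refine ⟨?_, ?_, ?_⟩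
      · rw [hb]
        show expand ((x, c) :: (v, k) :: rest) = _
        rw [hexp, List.map_append, List.map_replicate, min_eq_left hvx, hid]
        simp [expand]
      · rw [hb, hexp]
        simp only [List.map_append, List.map_replicate, min_eq_left hvx, hid]
        ring
      · rw [hb]
        intro p hp
        rcases List.mem_cons.mp hp with rfl | hp
        · exact hc
        · exact hpos p hp

lemma loopInv (p : List Int) :
    expand (p.foldl stepB ([], 0)).1 = (sfm p).reverse
    ∧ (p.foldl stepB ([], 0)).2 = p.sum - (sfm p).sum
    ∧ (∀ q ∈ (p.foldl stepB ([], 0)).1, 1 ≤ q.2) := by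
  induction p using List.reverseRecOn with
  | nil => simp [expand, sfm]
  | append_singleton p x ih =>
    rw [List.foldl_append, List.foldl_cons, List.foldl_nil]
    have hsort : (expand (p.foldl stepB ([], 0)).1).Pairwise (fun a b => b ≤ a) := by
      rw [ih.1, List.pairwise_reverse]
      exact sfm_sorted p
    have hspec := bpop_spec x (p.foldl stepB ([], 0)).1 (p.foldl stepB ([], 0)).2 1
      ih.2.2 le_rfl hsort
    have hsum_sfm : (sfm (p ++ [x])).sum = ((sfm p).map (fun a => min a x)).sum + x := by
      rw [sfm_append]; simp
    refine ⟨?_, ?_, ?_⟩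
    · show expand (stepB (p.foldl stepB ([], 0)) x).1 = _
      rw [stepB, hspec.1, ih.1, sfm_append, List.reverse_append, ← List.map_reverse]
      simp
    · show (stepB (p.foldl stepB ([], 0)) x).2 = _
      rw [stepB, hspec.2.1, ih.1, ih.2.1, List.map_reverse, List.sum_reverse,
        List.sum_reverse]
      rw [List.sum_append, List.sum_cons, List.sum_nil, hsum_sfm]
      ring
    · show ∀ q ∈ (stepB (p.foldl stepB ([], 0)) x).1, 1 ≤ q.2
      rw [stepB]; exact hspec.2.2

lemma alt_eq (g : List Int) : solution_alt g = g.sum - (sfm g).sum := by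
  show (g.foldl stepB ([], 0)).2 = _
  exact (loopInv g).2.1

lemma aloop (pre suf : List Int) (ans : Int) (hs : suf ≠ []) :
    (PySem.List.pyRange ((pre.length : Int) - 1) (-1) (-1)).foldl stepA (pre ++ sfm suf, ans)
      = (sfm (pre ++ suf), ans + pre.sum + (sfm suf).sum - (sfm (pre ++ suf)).sum) := by
  induction pre using List.reverseRecOn generalizing suf ans with
  | nil =>
    rw [PySem.List.pyRange_neg_one_eq_nil (by simp)]
    simp
  | append_singleton pre' a ih =>
    obtain ⟨b, t, hbt⟩ : ∃ b t, sfm suf = b :: t := by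
      cases suf with
      | nil => exact absurd rfl hs
      | cons c r =>
        cases h : sfm (c :: r) with
        | nil => exact absurd h (sfm_ne_nil c r)
        | cons b t => exact ⟨b, t, rfl⟩
    have hlen : ((pre' ++ [a]).length : Int) - 1 = (pre'.length : Int) := by
      simp
    rw [hlen, PySem.List.pyRange_neg_one_cons (by omega), List.foldl_cons]
    have hget : PySem.List.pyGetD (pre' ++ [a] ++ sfm suf) (pre'.length : Int) 0 = a := by
      rw [PySem.List.pyGetD_natCast]
      simp [List.getD, List.append_assoc]
    have hget1 : PySem.List.pyGetD (pre' ++ [a] ++ sfm suf) ((pre'.length : Int) + 1) 0 = b := by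
      have hc : ((pre'.length : Int) + 1) = ((pre'.length + 1 : Nat) : Int) := by push_cast; ring
      rw [hc, PySem.List.pyGetD_natCast]
      simp [List.getD, List.append_assoc, hbt]
    have hla : pre' ++ [a] ++ suf = pre' ++ a :: suf := by simp
    by_cases hab : a ≤ b
    · have hcons : sfm (a :: suf) = a :: b :: t := by
        rw [sfm_cons a suf b t hbt, min_eq_left hab]
      have hA : stepA (pre' ++ [a] ++ sfm suf, ans) (pre'.length : Int)
          = (pre' ++ sfm (a :: suf), ans) := by
        simp only [stepA]
        rw [hget, hget1, if_pos hab, hcons, hbt]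
        simp [List.append_assoc]
      rw [hA, ih (a :: suf) ans (by simp), hla]
      have hsum : (sfm (a :: suf)).sum = a + (sfm suf).sum := by
        rw [hcons, hbt]; simp
      refine congrArg₂ Prod.mk rfl ?_
      rw [hsum]
      simp only [List.sum_append, List.sum_cons, List.sum_nil]
      ring
    · have hcons : sfm (a :: suf) = b :: b :: t := by
        rw [sfm_cons a suf b t hbt, min_eq_right (by omega)]
      have hA : stepA (pre' ++ [a] ++ sfm suf, ans) (pre'.length : Int)
          = (pre' ++ sfm (a :: suf), ans - (b - a)) := by
        simp only [stepA]
        rw [hget, hget1, if_neg hab]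
        refine congrArg₂ Prod.mk ?_ rfl
        rw [PySem.List.pySetD_natCast, hcons, hbt, List.append_assoc,
          List.set_append_right _ _ (le_refl _)]
        simp
      rw [hA, ih (a :: suf) (ans - (b - a)) (by simp), hla]
      have hsum : (sfm (a :: suf)).sum = b + (sfm suf).sum := by
        rw [hcons, hbt]; simp
      refine congrArg₂ Prod.mk rfl ?_
      rw [hsum]
      simp only [List.sum_append, List.sum_cons, List.sum_nil]
      ring

-- ===== VERDICT (by name: the statement is the Claim_ definition above) =====
theorem solution_spec : Claim_equal_solution := by
  intro g _
  show solution g = solution_alt g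
  rw [alt_eq]
  unfold solution
  cases hg : g.reverse with
  | nil =>
    have : g = [] := by simpa using congrArg List.reverse hg
    subst this
    rw [show ((([] : List Int).length : Int) - 2) = -2 by simp,
      PySem.List.pyRange_neg_one_eq_nil (by norm_num)]
    simp [sfm]
  | cons a rest =>
    have hgeq : g = rest.reverse ++ [a] := by
      have := congrArg List.reverse hg
      simpa using this
    have hlen : ((g.length : Int) - 2) = ((rest.reverse.length : Int) - 1) := by
      rw [hgeq]; simp; ring
    have hstart : g = rest.reverse ++ sfm [a] := by
      rw [hgeq]; rfl
    have := aloop rest.reverse [a] 0 (by simp)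
    rw [hlen]
    conv_lhs => rw [hstart]
    show ((PySem.List.pyRange ((rest.reverse.length : Int) - 1) (-1) (-1)).foldl stepA
        (rest.reverse ++ sfm [a], 0)).2 = _
    rw [this]
    rw [← hgeq]
    have : rest.reverse.sum + (sfm [a]).sum = g.sum := by
      rw [hgeq]; simp [sfm]
    simp only []
    omega
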